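-- pv_equiv track=rewrite | github.com/bowen31337/agent-harness-skills | skills/golden_principles_cleanup.py | _rule_to_patterns
-- ===== SOURCE A (Python) =====
-- def _rule_to_patterns(rule_lower: str) -> list[tuple[str, str]]:
--     """Return (regex_pattern, description) pairs for a rule heuristic.
--
--     Patterns are matched against lowercased source lines.
--     Returns an empty list if no heuristic is known for the rule.
--     """
--     patterns: list[tuple[str, str]] = []
--
--     if any(kw in rule_lower for kw in ("repository layer", "repository pattern", "db query")):
--         patterns += [
--             (r"\bdb\.session\b", "direct db.session usage"),
--             (r"\bdb\.query\b", "direct db.query usage"),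
--             (r"\b\.objects\.filter\b", "direct ORM query outside repository"),
--             (r"\b\.objects\.get\b", "direct ORM .get() outside repository"),
--             (r"\bsession\.execute\b", "direct session.execute usage"),
--         ]
--
--     if any(kw in rule_lower for kw in ("integration test", "endpoint", "api test")):
--         patterns += [
--             (r"@(router|app)\.(get|post|put|patch|delete)\b", "route handler without test counterpart"),
--         ]
--
--     if any(kw in rule_lower for kw in ("dataclass", "plain dict", "typed dict")):
--         patterns += [
--             (r"def \w+\(.*\)\s*->\s*dict\b", "function returning plain dict"),
--             (r"return\s*\{['\"]", "returning a plain dict literal"),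
--         ]
--
--     if any(kw in rule_lower for kw in ("environment variable", "secret", "hardcoded")):
--         patterns += [
--             (r"(password|secret|api_key|token)\s*=\s*['\"][^'\"]{4,}", "potential hardcoded secret"),
--         ]
--
--     if any(kw in rule_lower for kw in ("import", "layer", "module boundary")):
--         patterns += [
--             (r"from\s+\.\.\.", "relative import crossing module boundary"),
--         ]
--
--     return patterns
-- ===== SOURCE B (Python) =====
-- _GROUP_PATTERNS = [
--     [
--         (r"\bdb\.session\b", "direct db.session usage"),
--         (r"\bdb\.query\b", "direct db.query usage"),
--         (r"\b\.objects\.filter\b", "direct ORM query outside repository"),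
--         (r"\b\.objects\.get\b", "direct ORM .get() outside repository"),
--         (r"\bsession\.execute\b", "direct session.execute usage"),
--     ],
--     [
--         (r"@(router|app)\.(get|post|put|patch|delete)\b", "route handler without test counterpart"),
--     ],
--     [
--         (r"def \w+\(.*\)\s*->\s*dict\b", "function returning plain dict"),
--         (r"return\s*\{['\"]", "returning a plain dict literal"),
--     ],
--     [
--         (r"(password|secret|api_key|token)\s*=\s*['\"][^'\"]{4,}", "potential hardcoded secret"),
--     ],
--     [
--         (r"from\s+\.\.\.", "relative import crossing module boundary"),
--     ],
-- ]
--
-- # keyword -> index of the pattern group it triggers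
-- _KW_GROUP = {
--     "repository layer": 0, "repository pattern": 0, "db query": 0,
--     "integration test": 1, "endpoint": 1, "api test": 1,
--     "dataclass": 2, "plain dict": 2, "typed dict": 2,
--     "environment variable": 3, "secret": 3, "hardcoded": 3,
--     "import": 4, "layer": 4, "module boundary": 4,
-- }
--
-- _KW_LENGTHS = sorted({len(kw) for kw in _KW_GROUP})
--
--
-- def _matched_groups(rule_lower):
--     """One left-to-right scan: hash every window of a keyword length into _KW_GROUP."""
--     matched = set()
--     for i in range(len(rule_lower)):
--         for L in _KW_LENGTHS:
--             g = _KW_GROUP.get(rule_lower[i:i + L])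
--             if g is not None:
--                 matched.add(g)
--     return matched
--
--
-- def _rule_to_patterns(rule_lower: str) -> list[tuple[str, str]]:
--     """Substring-scan version: find triggered groups by dictionary lookup of
--     windows of the input, then emit their pattern groups in order."""
--     matched = _matched_groups(rule_lower)
--     patterns: list[tuple[str, str]] = []
--     for g, pats in enumerate(_GROUP_PATTERNS):
--         if g in matched:
--             patterns += pats
--     return patterns
-- ===== Notes on version B (the rewrite author's own statement) =====
-- stated objective: alternative
-- what changed: Instead of testing each of the 15 keywords with a substring-containment scan per keyword, B scans the input once, hashing every window whose length is a keyword length into a keyword-to-group dictionary to collect the set of triggered groups, then emits the pattern groups in order.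
import Mathlib
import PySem

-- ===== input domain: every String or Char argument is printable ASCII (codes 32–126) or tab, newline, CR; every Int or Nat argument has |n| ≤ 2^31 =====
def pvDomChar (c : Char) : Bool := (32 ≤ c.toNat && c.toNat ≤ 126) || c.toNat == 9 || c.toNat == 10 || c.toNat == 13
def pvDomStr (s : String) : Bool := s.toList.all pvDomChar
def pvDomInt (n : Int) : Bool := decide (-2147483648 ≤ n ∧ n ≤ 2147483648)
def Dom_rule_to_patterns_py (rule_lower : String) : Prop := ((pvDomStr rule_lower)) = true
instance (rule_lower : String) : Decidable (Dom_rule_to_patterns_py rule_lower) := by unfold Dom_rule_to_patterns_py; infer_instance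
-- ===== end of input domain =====

-- B finds triggered keyword groups by a single left-to-right window scan hashed into a keyword->group dict (set of groups), instead of A's per-keyword containment tests (objective: alternative).


-- ===== PORT A =====
def rule_to_patterns_py (rule_lower : String) : List (String × String) :=
  let patterns : List (String × String) := []
  let patterns :=
    if ["repository layer", "repository pattern", "db query"].any
        (fun kw => PySem.Str.isIn kw rule_lower) then
      patterns ++
        [("\\bdb\\.session\\b", "direct db.session usage"),
         ("\\bdb\\.query\\b", "direct db.query usage"),
         ("\\b\\.objects\\.filter\\b", "direct ORM query outside repository"),
         ("\\b\\.objects\\.get\\b", "direct ORM .get() outside repository"),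
         ("\\bsession\\.execute\\b", "direct session.execute usage")]
    else patterns
  let patterns :=
    if ["integration test", "endpoint", "api test"].any
        (fun kw => PySem.Str.isIn kw rule_lower) then
      patterns ++
        [("@(router|app)\\.(get|post|put|patch|delete)\\b", "route handler without test counterpart")]
    else patterns
  let patterns :=
    if ["dataclass", "plain dict", "typed dict"].any
        (fun kw => PySem.Str.isIn kw rule_lower) then
      patterns ++
        [("def \\w+\\(.*\\)\\s*->\\s*dict\\b", "function returning plain dict"),
         ("return\\s*\\{['\\\"]", "returning a plain dict literal")]
    else patterns
  let patterns :=
    if ["environment variable", "secret", "hardcoded"].any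
        (fun kw => PySem.Str.isIn kw rule_lower) then
      patterns ++
        [("(password|secret|api_key|token)\\s*=\\s*['\\\"][^'\\\"]{4,}", "potential hardcoded secret")]
    else patterns
  let patterns :=
    if ["import", "layer", "module boundary"].any
        (fun kw => PySem.Str.isIn kw rule_lower) then
      patterns ++
        [("from\\s+\\.\\.\\.", "relative import crossing module boundary")]
    else patterns
  patterns

-- ===== PORT B =====
def pvGroupPatterns : List (List (String × String)) :=
  [ [("\\bdb\\.session\\b", "direct db.session usage"),
     ("\\bdb\\.query\\b", "direct db.query usage"),
     ("\\b\\.objects\\.filter\\b", "direct ORM query outside repository"),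
     ("\\b\\.objects\\.get\\b", "direct ORM .get() outside repository"),
     ("\\bsession\\.execute\\b", "direct session.execute usage")],
    [("@(router|app)\\.(get|post|put|patch|delete)\\b", "route handler without test counterpart")],
    [("def \\w+\\(.*\\)\\s*->\\s*dict\\b", "function returning plain dict"),
     ("return\\s*\\{['\\\"]", "returning a plain dict literal")],
    [("(password|secret|api_key|token)\\s*=\\s*['\\\"][^'\\\"]{4,}", "potential hardcoded secret")],
    [("from\\s+\\.\\.\\.", "relative import crossing module boundary")] ]

-- keyword -> index of the pattern group it triggers; keys are written on the List Char side
-- (PySem models strings as List Char), as explicit character lists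
def pvKwGroup : PySem.Dict (List Char) Int :=
  PySem.Dict.ofList
    [(['r', 'e', 'p', 'o', 's', 'i', 't', 'o', 'r', 'y', ' ', 'l', 'a', 'y', 'e', 'r'], 0),
     (['r', 'e', 'p', 'o', 's', 'i', 't', 'o', 'r', 'y', ' ', 'p', 'a', 't', 't', 'e', 'r', 'n'], 0),
     (['d', 'b', ' ', 'q', 'u', 'e', 'r', 'y'], 0),
     (['i', 'n', 't', 'e', 'g', 'r', 'a', 't', 'i', 'o', 'n', ' ', 't', 'e', 's', 't'], 1),
     (['e', 'n', 'd', 'p', 'o', 'i', 'n', 't'], 1),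
     (['a', 'p', 'i', ' ', 't', 'e', 's', 't'], 1),
     (['d', 'a', 't', 'a', 'c', 'l', 'a', 's', 's'], 2),
     (['p', 'l', 'a', 'i', 'n', ' ', 'd', 'i', 'c', 't'], 2),
     (['t', 'y', 'p', 'e', 'd', ' ', 'd', 'i', 'c', 't'], 2),
     (['e', 'n', 'v', 'i', 'r', 'o', 'n', 'm', 'e', 'n', 't', ' ', 'v', 'a', 'r', 'i', 'a', 'b', 'l', 'e'], 3),
     (['s', 'e', 'c', 'r', 'e', 't'], 3),
     (['h', 'a', 'r', 'd', 'c', 'o', 'd', 'e', 'd'], 3),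
     (['i', 'm', 'p', 'o', 'r', 't'], 4),
     (['l', 'a', 'y', 'e', 'r'], 4),
     (['m', 'o', 'd', 'u', 'l', 'e', ' ', 'b', 'o', 'u', 'n', 'd', 'a', 'r', 'y'], 4)]

def pvKwLengths : List Int :=
  PySem.List.sorted (PySem.Set.ofList ((PySem.Dict.keys pvKwGroup).map (fun k => (k.length : Int)))) id

-- one scan of the input: hash every window of a keyword length into pvKwGroup
def pvMatchedGroups (cs : List Char) : PySem.Set Int :=
  (PySem.List.pyRange 0 (cs.length : Int)).foldl
    (fun m i =>
      pvKwLengths.foldl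
        (fun m L =>
          match PySem.Dict.get? pvKwGroup (PySem.List.slice cs (some i) (some (i + L))) with
          | some g => PySem.Set.add m g
          | none => m)
        m)
    PySem.Set.empty

def rule_to_patterns_py_alt (rule_lower : String) : List (String × String) :=
  let matched := pvMatchedGroups rule_lower.toList
  (PySem.List.enumerate pvGroupPatterns).foldl
    (fun patterns gp => if PySem.Set.contains matched gp.1 then patterns ++ gp.2 else patterns) []

-- ===== PRECONDITION & SPEC =====
def Spec_rule_to_patterns_py (rule_lower : String) (out : List (String × String)) : Prop := out = rule_to_patterns_py_alt rule_lower
instance (rule_lower : String) (out : List (String × String)) : Decidable (Spec_rule_to_patterns_py rule_lower out) := by unfold Spec_rule_to_patterns_py; infer_instance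

-- ===== CLAIM (what is proved, stated in full; the proofs are below) =====
def Claim_equal_rule_to_patterns_py : Prop := ∀ (rule_lower : String), Dom_rule_to_patterns_py rule_lower → Spec_rule_to_patterns_py rule_lower (rule_to_patterns_py rule_lower)

-- ===== LEMMAS AND PROOFS =====

-- membership in a fold that conditionally adds to a set
theorem pv_mem_foldl_step {α : Type} (P : α → Int → Prop)
    (step : PySem.Set Int → α → PySem.Set Int)
    (h : ∀ (m : PySem.Set Int) (x : α) (g : Int), g ∈ step m x ↔ g ∈ m ∨ P x g) :
    ∀ (l : List α) (m : PySem.Set Int) (g : Int),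
      g ∈ l.foldl step m ↔ g ∈ m ∨ ∃ x ∈ l, P x g := by
  intro l
  induction l with
  | nil => intro m g; simp
  | cons x xs ih =>
    intro m g
    rw [List.foldl_cons, ih, h]
    simp only [List.mem_cons]
    constructor
    · rintro (⟨hm | hp⟩ | ⟨y, hy, hp⟩)
      · exact Or.inl hm
      · exact Or.inr ⟨x, Or.inl rfl, hp⟩
      · exact Or.inr ⟨y, Or.inr hy, hp⟩
    · rintro (hm | ⟨y, (rfl | hy), hp⟩)
      · exact Or.inl (Or.inl hm)
      · exact Or.inl (Or.inr hp)
      · exact Or.inr ⟨y, hy, hp⟩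

theorem pv_mem_matchedGroups (cs : List Char) (g : Int) :
    g ∈ pvMatchedGroups cs ↔
      ∃ i ∈ PySem.List.pyRange 0 (cs.length : Int), ∃ L ∈ pvKwLengths,
        PySem.Dict.get? pvKwGroup (PySem.List.slice cs (some i) (some (i + L))) = some g := by
  unfold pvMatchedGroups
  rw [pv_mem_foldl_step
      (P := fun i g => ∃ L ∈ pvKwLengths,
        PySem.Dict.get? pvKwGroup (PySem.List.slice cs (some i) (some (i + L))) = some g)]
  · simp [PySem.Set.empty]
  · intro m i g'
    rw [pv_mem_foldl_step
        (P := fun L g'' =>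
          PySem.Dict.get? pvKwGroup (PySem.List.slice cs (some i) (some (i + L))) = some g'')]
    intro m' L g''
    cases hd : PySem.Dict.get? pvKwGroup (PySem.List.slice cs (some i) (some (i + L))) with
    | none => simp
    | some v => simp [PySem.Set.mem_add, eq_comm]

-- a window hit is a substring occurrence
theorem pv_window_isIn (cs : List Char) (i L : Int)
    (hi : i ∈ PySem.List.pyRange 0 (cs.length : Int)) (hL : 0 ≤ L) (kw : List Char)
    (h : PySem.List.slice cs (some i) (some (i + L)) = kw) :
    PySem.Chars.isIn kw cs = true := by
  rw [PySem.List.mem_pyRange_one] at hi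
  obtain ⟨hi0, _⟩ := hi
  have hi' : i = ((i.toNat : Nat) : Int) := (Int.toNat_of_nonneg hi0).symm
  have hL' : L = ((L.toNat : Nat) : Int) := (Int.toNat_of_nonneg hL).symm
  rw [hi', hL', PySem.List.slice_natCast_add] at h
  rw [PySem.Chars.isIn_iff_infix, ← h]
  exact (List.take_prefix _ _).isInfix.trans (List.drop_suffix _ _).isInfix

-- a substring occurrence of a nonempty keyword is a window hit at its own length
theorem pv_isIn_window (cs kw : List Char) (hne : kw ≠ [])
    (h : PySem.Chars.isIn kw cs = true) :
    ∃ i ∈ PySem.List.pyRange 0 (cs.length : Int),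
      PySem.List.slice cs (some i) (some (i + (kw.length : Int))) = kw := by
  obtain ⟨j, hj⟩ := (PySem.Chars.exists_prefix_drop_iff_isIn kw cs).2 h
  have hjlen : j < cs.length := by
    by_contra hge
    rw [List.drop_eq_nil_of_le (by omega)] at hj
    exact hne (List.prefix_nil.mp hj)
  refine ⟨(j : Int), ?_, ?_⟩
  · rw [PySem.List.mem_pyRange_one]; constructor <;> omega
  · rw [PySem.List.slice_natCast_add, ← List.prefix_iff_eq_take.mp hj]

-- the dict literal reduces to an association list
def pvKwPairs : List (List Char × Int) :=
    [(['r', 'e', 'p', 'o', 's', 'i', 't', 'o', 'r', 'y', ' ', 'l', 'a', 'y', 'e', 'r'], 0),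
     (['r', 'e', 'p', 'o', 's', 'i', 't', 'o', 'r', 'y', ' ', 'p', 'a', 't', 't', 'e', 'r', 'n'], 0),
     (['d', 'b', ' ', 'q', 'u', 'e', 'r', 'y'], 0),
     (['i', 'n', 't', 'e', 'g', 'r', 'a', 't', 'i', 'o', 'n', ' ', 't', 'e', 's', 't'], 1),
     (['e', 'n', 'd', 'p', 'o', 'i', 'n', 't'], 1),
     (['a', 'p', 'i', ' ', 't', 'e', 's', 't'], 1),
     (['d', 'a', 't', 'a', 'c', 'l', 'a', 's', 's'], 2),
     (['p', 'l', 'a', 'i', 'n', ' ', 'd', 'i', 'c', 't'], 2),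
     (['t', 'y', 'p', 'e', 'd', ' ', 'd', 'i', 'c', 't'], 2),
     (['e', 'n', 'v', 'i', 'r', 'o', 'n', 'm', 'e', 'n', 't', ' ', 'v', 'a', 'r', 'i', 'a', 'b', 'l', 'e'], 3),
     (['s', 'e', 'c', 'r', 'e', 't'], 3),
     (['h', 'a', 'r', 'd', 'c', 'o', 'd', 'e', 'd'], 3),
     (['i', 'm', 'p', 'o', 'r', 't'], 4),
     (['l', 'a', 'y', 'e', 'r'], 4),
     (['m', 'o', 'd', 'u', 'l', 'e', ' ', 'b', 'o', 'u', 'n', 'd', 'a', 'r', 'y'], 4)]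

theorem pv_kwGroup_items : pvKwGroup = PySem.Dict.mk pvKwPairs := by decide

theorem pvKwLengths_eq : pvKwLengths = [5, 6, 8, 9, 10, 15, 16, 18, 20] := by decide

theorem pv_kwGroup_keys_nodup' : (PySem.Dict.mk pvKwPairs).keys.Nodup := by decide

-- per-group characterisation of the scan set, given the dict keywords of that group
theorem pv_contains_row (s : String) (g : Int) (row : List (List Char))
    (hchar : ∀ k : List Char, PySem.Dict.get? pvKwGroup k = some g ↔ k ∈ row)
    (hrow : ∀ kw ∈ row, kw ≠ [] ∧ ((kw.length : Int) ∈ pvKwLengths)) :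
    PySem.Set.contains (pvMatchedGroups s.toList) g
      = row.any (fun kw => PySem.Chars.isIn kw s.toList) := by
  rw [Bool.eq_iff_iff, PySem.Set.contains_iff, pv_mem_matchedGroups, List.any_eq_true]
  constructor
  · rintro ⟨i, hi, L, hL, hget⟩
    have hk := (hchar _).1 hget
    refine ⟨_, hk, ?_⟩
    have hL0 : 0 ≤ L := by
      have h9 : ∀ L' ∈ ([5, 6, 8, 9, 10, 15, 16, 18, 20] : List Int), (0:Int) ≤ L' := by decide
      exact h9 L (pvKwLengths_eq ▸ hL)
    exact pv_window_isIn _ i L hi hL0 _ rfl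
  · rintro ⟨kw, hkw, hin⟩
    obtain ⟨hne, hlen⟩ := hrow kw hkw
    obtain ⟨i, hi, hslice⟩ := pv_isIn_window s.toList kw hne hin
    exact ⟨i, hi, (kw.length : Int), hlen, (hchar _).2 (by rw [hslice]; exact hkw)⟩

theorem pv_toList_0_0 : "repository layer".toList = ['r', 'e', 'p', 'o', 's', 'i', 't', 'o', 'r', 'y', ' ', 'l', 'a', 'y', 'e', 'r'] := by decide
theorem pv_toList_0_1 : "repository pattern".toList = ['r', 'e', 'p', 'o', 's', 'i', 't', 'o', 'r', 'y', ' ', 'p', 'a', 't', 't', 'e', 'r', 'n'] := by decide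
theorem pv_toList_0_2 : "db query".toList = ['d', 'b', ' ', 'q', 'u', 'e', 'r', 'y'] := by decide

theorem pv_contains_g0 (s : String) :
    PySem.Set.contains (pvMatchedGroups s.toList) 0
      = (["repository layer", "repository pattern", "db query"] : List String).any
          (fun kw => PySem.Str.isIn kw s) := by
  have hchar : ∀ k : List Char,
      PySem.Dict.get? pvKwGroup k = some 0 ↔ k ∈ ([['r', 'e', 'p', 'o', 's', 'i', 't', 'o', 'r', 'y', ' ', 'l', 'a', 'y', 'e', 'r'], ['r', 'e', 'p', 'o', 's', 'i', 't', 'o', 'r', 'y', ' ', 'p', 'a', 't', 't', 'e', 'r', 'n'], ['d', 'b', ' ', 'q', 'u', 'e', 'r', 'y']] : List (List Char)) := by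
    intro k
    rw [pv_kwGroup_items, PySem.Dict.get?_eq_some_iff_mem_items _ _ _ pv_kwGroup_keys_nodup']
    simp only [pvKwPairs, List.mem_cons, List.not_mem_nil, or_false, Prod.mk.injEq]
    norm_num
  have hrow : ∀ kw ∈ ([['r', 'e', 'p', 'o', 's', 'i', 't', 'o', 'r', 'y', ' ', 'l', 'a', 'y', 'e', 'r'], ['r', 'e', 'p', 'o', 's', 'i', 't', 'o', 'r', 'y', ' ', 'p', 'a', 't', 't', 'e', 'r', 'n'], ['d', 'b', ' ', 'q', 'u', 'e', 'r', 'y']] : List (List Char)),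
      kw ≠ [] ∧ ((kw.length : Int) ∈ pvKwLengths) := by
    intro kw hkw
    simp only [List.mem_cons, List.not_mem_nil, or_false] at hkw
    rcases hkw with rfl | rfl | rfl <;>
      exact ⟨by decide, by rw [pvKwLengths_eq]; decide⟩
  rw [pv_contains_row s 0 _ hchar hrow]
  simp only [List.any_cons, List.any_nil, PySem.Str.isIn_eq,
    pv_toList_0_0, pv_toList_0_1, pv_toList_0_2]

theorem pv_toList_1_0 : "integration test".toList = ['i', 'n', 't', 'e', 'g', 'r', 'a', 't', 'i', 'o', 'n', ' ', 't', 'e', 's', 't'] := by decide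
theorem pv_toList_1_1 : "endpoint".toList = ['e', 'n', 'd', 'p', 'o', 'i', 'n', 't'] := by decide
theorem pv_toList_1_2 : "api test".toList = ['a', 'p', 'i', ' ', 't', 'e', 's', 't'] := by decide

theorem pv_contains_g1 (s : String) :
    PySem.Set.contains (pvMatchedGroups s.toList) 1
      = (["integration test", "endpoint", "api test"] : List String).any
          (fun kw => PySem.Str.isIn kw s) := by
  have hchar : ∀ k : List Char,
      PySem.Dict.get? pvKwGroup k = some 1 ↔ k ∈ ([['i', 'n', 't', 'e', 'g', 'r', 'a', 't', 'i', 'o', 'n', ' ', 't', 'e', 's', 't'], ['e', 'n', 'd', 'p', 'o', 'i', 'n', 't'], ['a', 'p', 'i', ' ', 't', 'e', 's', 't']] : List (List Char)) := by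
    intro k
    rw [pv_kwGroup_items, PySem.Dict.get?_eq_some_iff_mem_items _ _ _ pv_kwGroup_keys_nodup']
    simp only [pvKwPairs, List.mem_cons, List.not_mem_nil, or_false, Prod.mk.injEq]
    norm_num
  have hrow : ∀ kw ∈ ([['i', 'n', 't', 'e', 'g', 'r', 'a', 't', 'i', 'o', 'n', ' ', 't', 'e', 's', 't'], ['e', 'n', 'd', 'p', 'o', 'i', 'n', 't'], ['a', 'p', 'i', ' ', 't', 'e', 's', 't']] : List (List Char)),
      kw ≠ [] ∧ ((kw.length : Int) ∈ pvKwLengths) := by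
    intro kw hkw
    simp only [List.mem_cons, List.not_mem_nil, or_false] at hkw
    rcases hkw with rfl | rfl | rfl <;>
      exact ⟨by decide, by rw [pvKwLengths_eq]; decide⟩
  rw [pv_contains_row s 1 _ hchar hrow]
  simp only [List.any_cons, List.any_nil, PySem.Str.isIn_eq,
    pv_toList_1_0, pv_toList_1_1, pv_toList_1_2]

theorem pv_toList_2_0 : "dataclass".toList = ['d', 'a', 't', 'a', 'c', 'l', 'a', 's', 's'] := by decide
theorem pv_toList_2_1 : "plain dict".toList = ['p', 'l', 'a', 'i', 'n', ' ', 'd', 'i', 'c', 't'] := by decide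
theorem pv_toList_2_2 : "typed dict".toList = ['t', 'y', 'p', 'e', 'd', ' ', 'd', 'i', 'c', 't'] := by decide

theorem pv_contains_g2 (s : String) :
    PySem.Set.contains (pvMatchedGroups s.toList) 2
      = (["dataclass", "plain dict", "typed dict"] : List String).any
          (fun kw => PySem.Str.isIn kw s) := by
  have hchar : ∀ k : List Char,
      PySem.Dict.get? pvKwGroup k = some 2 ↔ k ∈ ([['d', 'a', 't', 'a', 'c', 'l', 'a', 's', 's'], ['p', 'l', 'a', 'i', 'n', ' ', 'd', 'i', 'c', 't'], ['t', 'y', 'p', 'e', 'd', ' ', 'd', 'i', 'c', 't']] : List (List Char)) := by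
    intro k
    rw [pv_kwGroup_items, PySem.Dict.get?_eq_some_iff_mem_items _ _ _ pv_kwGroup_keys_nodup']
    simp only [pvKwPairs, List.mem_cons, List.not_mem_nil, or_false, Prod.mk.injEq]
    norm_num
  have hrow : ∀ kw ∈ ([['d', 'a', 't', 'a', 'c', 'l', 'a', 's', 's'], ['p', 'l', 'a', 'i', 'n', ' ', 'd', 'i', 'c', 't'], ['t', 'y', 'p', 'e', 'd', ' ', 'd', 'i', 'c', 't']] : List (List Char)),
      kw ≠ [] ∧ ((kw.length : Int) ∈ pvKwLengths) := by
    intro kw hkw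
    simp only [List.mem_cons, List.not_mem_nil, or_false] at hkw
    rcases hkw with rfl | rfl | rfl <;>
      exact ⟨by decide, by rw [pvKwLengths_eq]; decide⟩
  rw [pv_contains_row s 2 _ hchar hrow]
  simp only [List.any_cons, List.any_nil, PySem.Str.isIn_eq,
    pv_toList_2_0, pv_toList_2_1, pv_toList_2_2]

theorem pv_toList_3_0 : "environment variable".toList = ['e', 'n', 'v', 'i', 'r', 'o', 'n', 'm', 'e', 'n', 't', ' ', 'v', 'a', 'r', 'i', 'a', 'b', 'l', 'e'] := by decide
theorem pv_toList_3_1 : "secret".toList = ['s', 'e', 'c', 'r', 'e', 't'] := by decide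
theorem pv_toList_3_2 : "hardcoded".toList = ['h', 'a', 'r', 'd', 'c', 'o', 'd', 'e', 'd'] := by decide

theorem pv_contains_g3 (s : String) :
    PySem.Set.contains (pvMatchedGroups s.toList) 3
      = (["environment variable", "secret", "hardcoded"] : List String).any
          (fun kw => PySem.Str.isIn kw s) := by
  have hchar : ∀ k : List Char,
      PySem.Dict.get? pvKwGroup k = some 3 ↔ k ∈ ([['e', 'n', 'v', 'i', 'r', 'o', 'n', 'm', 'e', 'n', 't', ' ', 'v', 'a', 'r', 'i', 'a', 'b', 'l', 'e'], ['s', 'e', 'c', 'r', 'e', 't'], ['h', 'a', 'r', 'd', 'c', 'o', 'd', 'e', 'd']] : List (List Char)) := by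
    intro k
    rw [pv_kwGroup_items, PySem.Dict.get?_eq_some_iff_mem_items _ _ _ pv_kwGroup_keys_nodup']
    simp only [pvKwPairs, List.mem_cons, List.not_mem_nil, or_false, Prod.mk.injEq]
    norm_num
  have hrow : ∀ kw ∈ ([['e', 'n', 'v', 'i', 'r', 'o', 'n', 'm', 'e', 'n', 't', ' ', 'v', 'a', 'r', 'i', 'a', 'b', 'l', 'e'], ['s', 'e', 'c', 'r', 'e', 't'], ['h', 'a', 'r', 'd', 'c', 'o', 'd', 'e', 'd']] : List (List Char)),
      kw ≠ [] ∧ ((kw.length : Int) ∈ pvKwLengths) := by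
    intro kw hkw
    simp only [List.mem_cons, List.not_mem_nil, or_false] at hkw
    rcases hkw with rfl | rfl | rfl <;>
      exact ⟨by decide, by rw [pvKwLengths_eq]; decide⟩
  rw [pv_contains_row s 3 _ hchar hrow]
  simp only [List.any_cons, List.any_nil, PySem.Str.isIn_eq,
    pv_toList_3_0, pv_toList_3_1, pv_toList_3_2]

theorem pv_toList_4_0 : "import".toList = ['i', 'm', 'p', 'o', 'r', 't'] := by decide
theorem pv_toList_4_1 : "layer".toList = ['l', 'a', 'y', 'e', 'r'] := by decide
theorem pv_toList_4_2 : "module boundary".toList = ['m', 'o', 'd', 'u', 'l', 'e', ' ', 'b', 'o', 'u', 'n', 'd', 'a', 'r', 'y'] := by decide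

theorem pv_contains_g4 (s : String) :
    PySem.Set.contains (pvMatchedGroups s.toList) 4
      = (["import", "layer", "module boundary"] : List String).any
          (fun kw => PySem.Str.isIn kw s) := by
  have hchar : ∀ k : List Char,
      PySem.Dict.get? pvKwGroup k = some 4 ↔ k ∈ ([['i', 'm', 'p', 'o', 'r', 't'], ['l', 'a', 'y', 'e', 'r'], ['m', 'o', 'd', 'u', 'l', 'e', ' ', 'b', 'o', 'u', 'n', 'd', 'a', 'r', 'y']] : List (List Char)) := by
    intro k
    rw [pv_kwGroup_items, PySem.Dict.get?_eq_some_iff_mem_items _ _ _ pv_kwGroup_keys_nodup']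
    simp only [pvKwPairs, List.mem_cons, List.not_mem_nil, or_false, Prod.mk.injEq]
    norm_num
  have hrow : ∀ kw ∈ ([['i', 'm', 'p', 'o', 'r', 't'], ['l', 'a', 'y', 'e', 'r'], ['m', 'o', 'd', 'u', 'l', 'e', ' ', 'b', 'o', 'u', 'n', 'd', 'a', 'r', 'y']] : List (List Char)),
      kw ≠ [] ∧ ((kw.length : Int) ∈ pvKwLengths) := by
    intro kw hkw
    simp only [List.mem_cons, List.not_mem_nil, or_false] at hkw
    rcases hkw with rfl | rfl | rfl <;>
      exact ⟨by decide, by rw [pvKwLengths_eq]; decide⟩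
  rw [pv_contains_row s 4 _ hchar hrow]
  simp only [List.any_cons, List.any_nil, PySem.Str.isIn_eq,
    pv_toList_4_0, pv_toList_4_1, pv_toList_4_2]

-- ===== VERDICT (by name: the statement is the Claim_ definition above) =====
theorem rule_to_patterns_py_spec : Claim_equal_rule_to_patterns_py := by
  intro s _
  unfold Spec_rule_to_patterns_py rule_to_patterns_py rule_to_patterns_py_alt pvGroupPatterns
  dsimp only [PySem.List.enumerate_cons, PySem.List.enumerate_nil, List.foldl]
  simp only [Int.reduceAdd]
  simp only [pv_contains_g0, pv_contains_g1, pv_contains_g2, pv_contains_g3, pv_contains_g4]
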